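-- pv_equiv track=rewrite | github.com/brunolnetto/duwhal | examples/pathintegral/graph/scc.py | _identify_sinks
-- ===== SOURCE A (Python) =====
-- from typing import Dict, List, Set, Tuple, Optional
--
-- def _identify_sinks(
--     adj: Dict[int, List[int]],
--     sccs: List[List[int]],
--     node_to_scc: Dict[int, int],
-- ) -> List[bool]:
--     """A sink SCC has no outgoing edges to other SCCs."""
--     is_sink = [True] * len(sccs)
--     for i, scc in enumerate(sccs):
--         scc_set = set(scc)
--         for v in scc:
--             for w in adj.get(v, []):
--                 if w not in scc_set:
--                     is_sink[i] = False
--                     break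
--             if not is_sink[i]:
--                 break
--     return is_sink
-- ===== SOURCE B (Python) =====
-- def _identify_sinks(adj, sccs, node_to_scc):
--     """A sink SCC has no outgoing edges to other SCCs."""
--     idx = {}
--     for i, scc in enumerate(sccs):
--         for v in scc:
--             idx.setdefault(v, set()).add(i)
--     is_sink = [True] * len(sccs)
--     for v in adj:
--         nbrs = adj[v]
--         for i in idx.get(v, ()):
--             if any(i not in idx.get(w, ()) for w in nbrs):
--                 is_sink[i] = False
--     return is_sink
-- ===== Notes on version B (the rewrite author's own statement) =====
-- stated objective: alternative
-- what changed: Replaces A's SCC-by-SCC triple loop (building a fresh membership set per SCC and scanning each member's adjacency) with a prebuilt node-to-scc-indices index followed by a single edge-centric pass over the adjacency dict.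
import Mathlib
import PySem

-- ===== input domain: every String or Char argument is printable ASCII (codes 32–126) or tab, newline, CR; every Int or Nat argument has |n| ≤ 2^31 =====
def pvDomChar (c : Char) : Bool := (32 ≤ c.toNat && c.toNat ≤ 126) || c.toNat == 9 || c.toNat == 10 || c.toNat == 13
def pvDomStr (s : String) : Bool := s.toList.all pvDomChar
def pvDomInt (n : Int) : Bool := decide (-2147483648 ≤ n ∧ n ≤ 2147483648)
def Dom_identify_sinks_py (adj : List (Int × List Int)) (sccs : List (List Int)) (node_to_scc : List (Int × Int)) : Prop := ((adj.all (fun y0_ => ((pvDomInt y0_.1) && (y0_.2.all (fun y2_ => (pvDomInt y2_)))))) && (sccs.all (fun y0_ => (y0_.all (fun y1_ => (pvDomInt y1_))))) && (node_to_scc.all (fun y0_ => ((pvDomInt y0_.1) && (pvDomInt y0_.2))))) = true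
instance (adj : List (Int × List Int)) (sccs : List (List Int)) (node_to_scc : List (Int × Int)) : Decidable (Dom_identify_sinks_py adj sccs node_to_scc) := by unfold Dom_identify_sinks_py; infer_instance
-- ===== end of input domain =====

-- B replaces A's SCC-by-SCC scan (with a fresh membership set per SCC) by a prebuilt
-- node→scc-indices index and a single edge-centric pass over adj (objective: alternative).

-- ===== PORT A =====
-- inner 'for w in adj.get(v, [])' with break: returns the is_sink flag for this scc
def pvLoopW (scc_set : PySem.Set Int) : List Int → Bool
  | [] => true
  | w :: ws => if !(PySem.Set.contains scc_set w) then false else pvLoopW scc_set ws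

-- 'for v in scc' with the 'if not is_sink[i]: break'
def pvLoopV (adjD : PySem.Dict Int (List Int)) (scc_set : PySem.Set Int) : List Int → Bool
  | [] => true
  | v :: vs => if pvLoopW scc_set (adjD.getD v []) = false then false
               else pvLoopV adjD scc_set vs

def identify_sinks_py (adj : List (Int × List Int)) (sccs : List (List Int)) (node_to_scc : List (Int × Int)) : List Bool :=
  let adjD := PySem.Dict.mk adj
  (PySem.List.enumerate sccs 0).foldl
    (fun is_sink p =>
      let scc_set := PySem.Set.ofList p.2
      if pvLoopV adjD scc_set p.2 then is_sink else is_sink.set p.1.toNat false)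
    (List.replicate sccs.length true)

-- ===== PORT B =====
-- idx: node -> set of indices of the SCCs containing it (idx.setdefault(v, set()).add(i))
def pvBuildIdx (sccs : List (List Int)) : PySem.Dict Int (PySem.Set Int) :=
  (PySem.List.enumerate sccs 0).foldl
    (fun d p => p.2.foldl (fun d v => d.modify v PySem.Set.empty (fun s => PySem.Set.add s p.1)) d)
    PySem.Dict.empty

def identify_sinks_py_alt (adj : List (Int × List Int)) (sccs : List (List Int)) (node_to_scc : List (Int × Int)) : List Bool :=
  let adjD := PySem.Dict.mk adj
  let idx := pvBuildIdx sccs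
  adjD.keys.foldl
    (fun is_sink v =>
      let nbrs := adjD.getD v []
      (idx.getD v PySem.Set.empty).foldl
        (fun is_sink i =>
          if nbrs.any (fun w => !(PySem.Set.contains (idx.getD w PySem.Set.empty) i))
          then is_sink.set i.toNat false else is_sink)
        is_sink)
    (List.replicate sccs.length true)

-- ===== PRECONDITION & SPEC =====
def Spec_identify_sinks_py (adj : List (Int × List Int)) (sccs : List (List Int)) (node_to_scc : List (Int × Int)) (out : List Bool) : Prop := out = identify_sinks_py_alt adj sccs node_to_scc
instance (adj : List (Int × List Int)) (sccs : List (List Int)) (node_to_scc : List (Int × Int)) (out : List Bool) : Decidable (Spec_identify_sinks_py adj sccs node_to_scc out) := by unfold Spec_identify_sinks_py; infer_instance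

-- ===== CLAIM (what is proved, stated in full; the proofs are below) =====
def Claim_equal_identify_sinks_py : Prop := ∀ (adj : List (Int × List Int)) (sccs : List (List Int)) (node_to_scc : List (Int × Int)), Dom_identify_sinks_py adj sccs node_to_scc → Spec_identify_sinks_py adj sccs node_to_scc (identify_sinks_py adj sccs node_to_scc)

-- ===== LEMMAS AND PROOFS =====

-- "scc has an edge leaving it": the common mathematical content of both programs
def pvBad (adjD : PySem.Dict Int (List Int)) (scc : List Int) : Bool :=
  scc.any (fun v => (adjD.getD v []).any (fun w => !(decide (w ∈ scc))))

theorem pvContains_ofList (scc : List Int) (w : Int) :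
    PySem.Set.contains (PySem.Set.ofList scc) w = decide (w ∈ scc) := by
  by_cases h : w ∈ scc <;> simp [h, PySem.Set.contains_eq_listContains, PySem.Set.mem_ofList]

theorem pvNotContains (S : PySem.Set Int) (x : Int) :
    (!PySem.Set.contains S x) = true ↔ x ∉ S := by
  rw [Bool.not_eq_true']
  constructor
  · intro h hx
    rw [← PySem.Set.contains_iff] at hx
    rw [h] at hx
    cases hx
  · intro h
    cases hc : PySem.Set.contains S x
    · rfl
    · exfalso
      apply h
      rw [← PySem.Set.contains_iff]
      exact hc

theorem pvLoopW_eq (s : PySem.Set Int) (ws : List Int) :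
    pvLoopW s ws = !(ws.any (fun w => !(PySem.Set.contains s w))) := by
  induction ws with
  | nil => simp [pvLoopW]
  | cons w ws ih =>
      rw [pvLoopW, ih, List.any_cons]
      cases h : PySem.Set.contains s w
      · simp
      · simp

theorem pvLoopV_any (adjD : PySem.Dict Int (List Int)) (s : PySem.Set Int) (l : List Int) :
    pvLoopV adjD s l
      = !(l.any (fun v => (adjD.getD v []).any (fun w => !(PySem.Set.contains s w)))) := by
  induction l with
  | nil => simp [pvLoopV]
  | cons v vs ih =>
      rw [pvLoopV, pvLoopW_eq, ih, List.any_cons]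
      cases h : (adjD.getD v []).any (fun w => !(PySem.Set.contains s w))
      · simp
      · simp

theorem pvLoopV_eq (adjD : PySem.Dict Int (List Int)) (scc : List Int) :
    pvLoopV adjD (PySem.Set.ofList scc) scc = !(pvBad adjD scc) := by
  rw [pvLoopV_any, pvBad]
  simp only [pvContains_ofList]

-- the A-side fold: iteration k conditionally writes only position s + k
theorem pvFoldEnumSet (f : List Int → Bool) :
    ∀ (l : List (List Int)) (s : Nat) (acc : List Bool), s + l.length ≤ acc.length →
    ∀ j : Nat,
      ((PySem.List.enumerate l (s : Int)).foldl
        (fun a p => if f p.2 then a else a.set p.1.toNat false) acc)[j]?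
      = if s ≤ j ∧ j < s + l.length then (if f (l.getD (j - s) []) then acc[j]? else some false)
        else acc[j]? := by
  intro l
  induction l with
  | nil =>
      intro s acc _ j
      rw [PySem.List.enumerate_nil, List.foldl_nil, if_neg (by simp)]
  | cons x l ih =>
      intro s acc hlen j
      rw [PySem.List.enumerate_cons, List.foldl_cons]
      have hcast : (s : Int) + 1 = ((s + 1 : Nat) : Int) := by push_cast; ring
      rw [hcast]
      set acc' : List Bool := if f x then acc else acc.set ((s : Int)).toNat false with hacc'
      have hlen' : acc'.length = acc.length := by rw [hacc']; split <;> simp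
      have hlc : (x :: l).length = l.length + 1 := by simp
      have hacc'j : ∀ j' : Nat, j' ≠ s → acc'[j']? = acc[j']? := by
        intro j' hne
        rw [hacc']; split
        · rfl
        · rw [List.getElem?_set]
          simp [Int.toNat_natCast, Ne.symm hne]
      rw [ih (s + 1) acc' (by rw [hlen']; rw [hlc] at hlen; omega) j]
      by_cases h1 : s + 1 ≤ j ∧ j < s + 1 + l.length
      · rw [if_pos h1, if_pos (show s ≤ j ∧ j < s + (x :: l).length by rw [hlc]; omega)]
        have h3 : j - s = (j - (s + 1)) + 1 := by omega
        rw [h3, List.getD_cons_succ]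
        split
        · exact hacc'j j (by omega)
        · rfl
      · rw [if_neg h1]
        by_cases hj : j = s
        · subst hj
          rw [if_pos (show j ≤ j ∧ j < j + (x :: l).length by rw [hlc]; omega)]
          rw [Nat.sub_self, List.getD_cons_zero, hacc']
          have hs : j < acc.length := by rw [hlc] at hlen; omega
          split
          · rfl
          · rw [List.getElem?_set]
            simp [Int.toNat_natCast, hs]
        · rw [if_neg (show ¬ (s ≤ j ∧ j < s + (x :: l).length) by rw [hlc]; omega)]
          exact hacc'j j hj

theorem A_char (adj : List (Int × List Int)) (sccs : List (List Int)) (nts : List (Int × Int)) :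
    identify_sinks_py adj sccs nts
      = sccs.map (fun scc => !(pvBad (PySem.Dict.mk adj) scc)) := by
  apply List.ext_getElem?
  intro j
  have key := pvFoldEnumSet
    (fun scc => pvLoopV (PySem.Dict.mk adj) (PySem.Set.ofList scc) scc)
    sccs 0 (List.replicate sccs.length true) (by simp) j
  simp only [Nat.cast_zero, Nat.zero_add, Nat.sub_zero, Nat.zero_le, true_and] at key
  show ((PySem.List.enumerate sccs 0).foldl
      (fun a p => if pvLoopV (PySem.Dict.mk adj) (PySem.Set.ofList p.2) p.2 then a
                  else a.set p.1.toNat false)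
      (List.replicate sccs.length true))[j]? = _
  rw [key]
  by_cases hj : j < sccs.length
  · rw [if_pos hj, List.getElem?_map, List.getElem?_eq_getElem hj]
    have hgd : sccs.getD j [] = sccs[j] := List.getD_eq_getElem sccs [] hj
    simp only [hgd]
    rw [pvLoopV_eq]
    cases hb : pvBad (PySem.Dict.mk adj) sccs[j] <;>
      simp [hb, hj]
  · rw [if_neg hj, List.getElem?_replicate, if_neg hj, List.getElem?_map,
        List.getElem?_eq_none (by omega)]
    rfl

-- ===== B-side =====

theorem pvIdxInner (k : Int) (scc : List Int) :
    ∀ (d : PySem.Dict Int (PySem.Set Int)) (v i : Int),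
      i ∈ ((scc.foldl (fun d v => d.modify v PySem.Set.empty (fun s => PySem.Set.add s k)) d).getD
            v PySem.Set.empty)
      ↔ i ∈ d.getD v PySem.Set.empty ∨ (v ∈ scc ∧ i = k) := by
  induction scc with
  | nil => intro d v i; simp
  | cons x xs ih =>
      intro d v i
      rw [List.foldl_cons, ih, PySem.Dict.getD_modify]
      by_cases hv : v = x
      · subst hv
        simp only [if_true, PySem.Set.mem_add, List.mem_cons]
        tauto
      · rw [if_neg hv]
        simp only [List.mem_cons]
        tauto

theorem pvIdxOuter :
    ∀ (l : List (List Int)) (s : Nat) (d : PySem.Dict Int (PySem.Set Int)) (v i : Int),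
      i ∈ ((PySem.List.enumerate l (s : Int)).foldl
            (fun d p => p.2.foldl
              (fun d v => d.modify v PySem.Set.empty (fun t => PySem.Set.add t p.1)) d) d).getD
            v PySem.Set.empty
      ↔ i ∈ d.getD v PySem.Set.empty
        ∨ ∃ (k : Nat), ∃ _ : k < l.length, i = ((s + k : Nat) : Int) ∧ v ∈ l[k] := by
  intro l
  induction l with
  | nil => intro s d v i; simp [PySem.List.enumerate_nil]
  | cons x l ih =>
      intro s d v i
      rw [PySem.List.enumerate_cons, List.foldl_cons]
      have hcast : (s : Int) + 1 = ((s + 1 : Nat) : Int) := by push_cast; ring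
      rw [hcast, ih (s + 1), pvIdxInner]
      constructor
      · rintro (⟨h | ⟨hv, hi⟩⟩ | ⟨k, hk, hi, hv⟩)
        · exact Or.inl h
        · exact Or.inr ⟨0, by simp, by simpa using hi, by simpa using hv⟩
        · refine Or.inr ⟨k + 1, by simpa using hk, ?_, by simpa using hv⟩
          rw [hi]; congr 1; omega
      · rintro (h | ⟨k, hk, hi, hv⟩)
        · exact Or.inl (Or.inl h)
        · cases k with
          | zero => exact Or.inl (Or.inr ⟨by simpa using hv, by simpa using hi⟩)
          | succ k =>
              refine Or.inr ⟨k, by simpa using hk, ?_, by simpa using hv⟩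
              rw [hi]; congr 1; omega

theorem pvBuildIdx_mem (sccs : List (List Int)) (v i : Int) :
    i ∈ (pvBuildIdx sccs).getD v PySem.Set.empty
      ↔ ∃ (k : Nat), ∃ _ : k < sccs.length, i = (k : Int) ∧ v ∈ sccs[k] := by
  have key := pvIdxOuter sccs 0 PySem.Dict.empty v i
  simp only [Nat.cast_zero, Nat.zero_add] at key
  rw [pvBuildIdx, key, PySem.Dict.getD_empty]
  simp [PySem.Set.empty]

-- the B-side conditional-set fold, pointwise
theorem pvFoldCondSet (c : Int → Int → Bool) :
    ∀ (l : List (Int × Int)) (acc : List Bool),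
      (∀ p ∈ l, p.2.toNat < acc.length) →
      ∀ j : Nat,
        (l.foldl (fun a p => if c p.1 p.2 then a.set p.2.toNat false else a) acc)[j]?
        = if ∃ p ∈ l, c p.1 p.2 ∧ p.2.toNat = j then some false else acc[j]? := by
  intro l
  induction l with
  | nil => intro acc _ j; simp
  | cons p l ih =>
      intro acc hlt j
      rw [List.foldl_cons]
      set acc' : List Bool := if c p.1 p.2 then acc.set p.2.toNat false else acc with hacc'
      have hlen' : acc'.length = acc.length := by rw [hacc']; split <;> simp
      rw [ih acc' (by intro q hq; rw [hlen']; exact hlt q (List.mem_cons_of_mem _ hq)) j]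
      by_cases htail : ∃ q ∈ l, c q.1 q.2 ∧ q.2.toNat = j
      · obtain ⟨q, hq, hcq⟩ := htail
        rw [if_pos ⟨q, hq, hcq⟩, if_pos ⟨q, List.mem_cons_of_mem _ hq, hcq⟩]
      · rw [if_neg htail]
        by_cases hhead : c p.1 p.2 ∧ p.2.toNat = j
        · rw [if_pos ⟨p, List.mem_cons_self, hhead⟩, hacc', if_pos hhead.1, ← hhead.2,
              List.getElem?_set]
          have := hlt p List.mem_cons_self
          simp [this]
        · have hno : ¬ ∃ q ∈ p :: l, c q.1 q.2 ∧ q.2.toNat = j := by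
            rintro ⟨q, hq, hcq⟩
            rcases List.mem_cons.mp hq with rfl | hq'
            · exact hhead hcq
            · exact htail ⟨q, hq', hcq⟩
          rw [if_neg hno, hacc']
          split
          · next hc =>
              rw [List.getElem?_set]
              have hne : p.2.toNat ≠ j := fun h => hhead ⟨hc, h⟩
              simp [hne]
          · rfl

def pvCond (adj : List (Int × List Int)) (sccs : List (List Int)) (v i : Int) : Bool :=
  ((PySem.Dict.mk adj).getD v []).any
    (fun w => !(PySem.Set.contains ((pvBuildIdx sccs).getD w PySem.Set.empty) i))

def pvPairs (adj : List (Int × List Int)) (sccs : List (List Int)) : List (Int × Int) :=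
  (PySem.Dict.mk adj).keys.flatMap
    (fun v => ((pvBuildIdx sccs).getD v PySem.Set.empty).map (fun i => (v, i)))

theorem pvCond_iff (adj : List (Int × List Int)) (sccs : List (List Int)) (v i : Int) :
    pvCond adj sccs v i = true
      ↔ ∃ w ∈ (PySem.Dict.mk adj).getD v [], i ∉ (pvBuildIdx sccs).getD w PySem.Set.empty := by
  rw [pvCond, List.any_eq_true]
  constructor
  · rintro ⟨w, hw, hnot⟩
    exact ⟨w, hw, (pvNotContains _ _).mp hnot⟩
  · rintro ⟨w, hw, hnot⟩
    exact ⟨w, hw, (pvNotContains _ _).mpr hnot⟩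

theorem B_char (adj : List (Int × List Int)) (sccs : List (List Int)) (nts : List (Int × Int)) :
    identify_sinks_py_alt adj sccs nts
      = sccs.map (fun scc => !(pvBad (PySem.Dict.mk adj) scc)) := by
  have hmem := pvBuildIdx_mem sccs
  have hstep : identify_sinks_py_alt adj sccs nts
      = (pvPairs adj sccs).foldl
          (fun a p => if pvCond adj sccs p.1 p.2 then a.set p.2.toNat false else a)
          (List.replicate sccs.length true) := by
    show (PySem.Dict.mk adj).keys.foldl
        (fun is_sink v =>
          ((pvBuildIdx sccs).getD v PySem.Set.empty).foldl
            (fun is_sink i =>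
              if ((PySem.Dict.mk adj).getD v []).any
                   (fun w => !(PySem.Set.contains ((pvBuildIdx sccs).getD w PySem.Set.empty) i))
              then is_sink.set i.toNat false else is_sink)
            is_sink)
        (List.replicate sccs.length true) = _
    rw [pvPairs, List.foldl_flatMap]
    congr 1
    funext a v
    rw [List.foldl_map]
    rfl
  have hlt : ∀ p ∈ pvPairs adj sccs,
      p.2.toNat < (List.replicate sccs.length true).length := by
    intro p hp
    simp only [pvPairs, List.mem_flatMap, List.mem_map] at hp
    obtain ⟨v, hv, i, hi, rfl⟩ := hp
    obtain ⟨k, hk, rfl, -⟩ := (hmem v i).mp hi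
    simpa using hk
  apply List.ext_getElem?
  intro j
  rw [hstep, pvFoldCondSet (pvCond adj sccs) (pvPairs adj sccs)
        (List.replicate sccs.length true) hlt j]
  by_cases hj : j < sccs.length
  · rw [List.getElem?_map, List.getElem?_eq_getElem hj]
    have hiff : (∃ p ∈ pvPairs adj sccs, pvCond adj sccs p.1 p.2 ∧ p.2.toNat = j)
        ↔ pvBad (PySem.Dict.mk adj) sccs[j] = true := by
      constructor
      · rintro ⟨p, hp, hc, hjp⟩
        simp only [pvPairs, List.mem_flatMap, List.mem_map] at hp
        obtain ⟨v, hv, i, hi, rfl⟩ := hp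
        obtain ⟨k, hk, rfl, hvk⟩ := (hmem v i).mp hi
        have hkj : k = j := by simpa using hjp
        subst hkj
        obtain ⟨w, hw, hnot⟩ := (pvCond_iff adj sccs v _).mp hc
        have hwj : w ∉ sccs[k] := by
          intro hin
          exact hnot ((hmem w _).mpr ⟨k, hk, rfl, hin⟩)
        rw [pvBad, List.any_eq_true]
        refine ⟨v, hvk, ?_⟩
        rw [List.any_eq_true]
        exact ⟨w, hw, by simp [hwj]⟩
      · intro hb
        rw [pvBad, List.any_eq_true] at hb
        obtain ⟨v, hv, hb2⟩ := hb
        rw [List.any_eq_true] at hb2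
        obtain ⟨w, hw, hbw⟩ := hb2
        have hwj : w ∉ sccs[j] := by simpa using hbw
        have hvkeys : v ∈ (PySem.Dict.mk adj).keys := by
          by_cases hc : (PySem.Dict.mk adj).contains v = true
          · exact (PySem.Dict.contains_iff_mem_keys _ _).mp hc
          · exfalso
            have hget : (PySem.Dict.mk adj).getD v [] = [] := by
              apply PySem.Dict.getD_of_not_contains
              exact Bool.eq_false_iff.mpr hc
            rw [hget] at hw
            exact List.not_mem_nil hw
        refine ⟨(v, (j : Int)), ?_, ?_, by simp⟩
        · simp only [pvPairs, List.mem_flatMap, List.mem_map]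
          exact ⟨v, hvkeys, (j : Int), (hmem v _).mpr ⟨j, hj, rfl, hv⟩, rfl⟩
        · rw [pvCond_iff]
          refine ⟨w, hw, ?_⟩
          intro hin
          obtain ⟨k, hk, hkj, hwk⟩ := (hmem w _).mp hin
          have hkj' : ((j : Nat) : Int) = ((k : Nat) : Int) := hkj
          have : k = j := by exact_mod_cast hkj'.symm
          subst this
          exact hwj hwk
    cases hb : pvBad (PySem.Dict.mk adj) sccs[j]
    · have hno : ¬ (∃ p ∈ pvPairs adj sccs, pvCond adj sccs p.1 p.2 ∧ p.2.toNat = j) := by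
        intro h
        rw [hiff, hb] at h
        exact absurd h (by simp)
      rw [if_neg hno, List.getElem?_replicate, if_pos hj]
      simp [hb]
    · rw [if_pos (hiff.mpr hb)]
      simp [hb]
  · have hno : ¬ (∃ p ∈ pvPairs adj sccs, pvCond adj sccs p.1 p.2 ∧ p.2.toNat = j) := by
      rintro ⟨p, hp, hc, hjp⟩
      simp only [pvPairs, List.mem_flatMap, List.mem_map] at hp
      obtain ⟨v, hv, i, hi, rfl⟩ := hp
      obtain ⟨k, hk, rfl, -⟩ := (hmem v i).mp hi
      have : k = j := by simpa using hjp
      omega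
    rw [if_neg hno, List.getElem?_replicate, if_neg hj, List.getElem?_map,
        List.getElem?_eq_none (by omega)]
    rfl

-- ===== VERDICT (by name: the statement is the Claim_ definition above) =====
theorem identify_sinks_py_spec : Claim_equal_identify_sinks_py := by
  intro adj sccs nts _
  unfold Spec_identify_sinks_py
  rw [A_char, B_char]
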